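-- pv_equiv track=rewrite | github.com/isglobal-chagas/snake-epitopes | scripts/10_epitope_prediction.py | get_tier_epitope
-- ===== SOURCE A (Python) =====
-- def get_tier_epitope(epitope, tier, epi_len=8):
--     tier_epis = []
--     current_epi = []
--     for pos in epitope:
--         if pos[-1] <= tier:
--             current_epi.append(pos)
--         else:
--             if len(current_epi) >= epi_len:
--                 tier_epis.append(current_epi)
--                 current_epi = []
--             else:
--                 current_epi = []
--     if len(current_epi) >= epi_len:
--         tier_epis.append(current_epi)
--
--     if not tier_epis:
--         return None
--
--     final_epis = []
--     for epi in tier_epis: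
--         epitope_seq = "".join(x[1] for x in epi)
--         epitope_quality = "".join(str(x[-1]) for x in epi)
--         depth = [x[2] for x in epi]
--         min_depth = min(depth)
--         max_depth = max(depth)
--         epi_data = (epitope_seq,
--                     (min_depth, max_depth),
--                     epitope_quality
--                     )
--         final_epis.append(epi_data)
--     return final_epis
-- ===== SOURCE B (Python) =====
-- def get_tier_epitope(epitope, tier, epi_len=8):
--     # One pass over a shrinking suffix: cut off each maximal run of passing
--     # positions with a slice and summarise it immediately (no intermediate
--     # list-of-runs, no accumulator state machine).
--     res = []
--     rest = epitope
--     while rest: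
--         if rest[0][-1] <= tier:
--             k = 1
--             while k < len(rest) and rest[k][-1] <= tier:
--                 k += 1
--             run, rest = rest[:k], rest[k:]
--             if len(run) >= epi_len:
--                 res.append(("".join(p[1] for p in run),
--                             (min(p[2] for p in run), max(p[2] for p in run)),
--                             "".join(str(p[-1]) for p in run)))
--         else:
--             rest = rest[1:]
--     return res if res else None
-- ===== Notes on version B (the rewrite author's own statement) =====
-- stated objective: alternative
-- what changed: A runs a two-phase accumulator state machine (build a list of runs into tier_epis with a current_epi buffer, then a second pass summarising each run); B makes a single pass over a shrinking suffix, slicing off each maximal run of passing positions and summarising it immediately, with no intermediate list of runs.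
import Mathlib
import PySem

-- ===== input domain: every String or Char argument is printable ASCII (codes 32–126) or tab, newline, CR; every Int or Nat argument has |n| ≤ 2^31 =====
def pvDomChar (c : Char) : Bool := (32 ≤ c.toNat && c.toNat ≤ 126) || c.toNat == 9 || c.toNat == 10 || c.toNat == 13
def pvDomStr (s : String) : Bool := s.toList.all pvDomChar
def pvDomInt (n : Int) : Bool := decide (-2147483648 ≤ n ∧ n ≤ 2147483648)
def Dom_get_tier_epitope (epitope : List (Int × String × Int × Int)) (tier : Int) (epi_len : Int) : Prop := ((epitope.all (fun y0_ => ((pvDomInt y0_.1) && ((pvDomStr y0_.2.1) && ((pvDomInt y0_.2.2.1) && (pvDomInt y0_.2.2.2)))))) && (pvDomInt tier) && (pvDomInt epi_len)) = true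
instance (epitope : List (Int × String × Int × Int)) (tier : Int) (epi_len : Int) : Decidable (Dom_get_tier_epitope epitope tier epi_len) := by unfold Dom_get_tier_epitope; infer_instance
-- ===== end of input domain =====

-- B replaces A's two-phase accumulator state machine by a single pass that slices off each
-- maximal run of passing positions from the remaining suffix and summarises it immediately
-- (objective: alternative decomposition, same cost; equal return value on all of Pre_).

-- ===== PORT A =====
-- A's loop body: current_epi is extended on a passing position; on a failing position the
-- current run is flushed to tier_epis when long enough, and reset either way
def pvStepA (tier epi_len : Int) (st : List (List (Int × String × Int × Int)) × List (Int × String × Int × Int)) (pos : Int × String × Int × Int) : List (List (Int × String × Int × Int)) × List (Int × String × Int × Int) :=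
  if pos.2.2.2 ≤ tier then (st.1, st.2 ++ [pos])
  else if epi_len ≤ (st.2.length : Int) then (st.1 ++ [st.2], [])
  else (st.1, [])

def get_tier_epitope (epitope : List (Int × String × Int × Int)) (tier : Int) (epi_len : Int) : Option (List (String × (Int × Int) × String)) :=
  let st := epitope.foldl (pvStepA tier epi_len) ([], [])
  let tier_epis := if epi_len ≤ (st.2.length : Int) then st.1 ++ [st.2] else st.1
  if tier_epis = [] then none
  else
    -- final pass: for epi in tier_epis, build (seq, (min_depth, max_depth), quality);
    -- min/max of an empty run would raise ValueError in Python: Pre_ excludes exactly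
    -- those inputs, so the .getD 0 default is never reached under Pre_
    some (tier_epis.map (fun epi =>
      (PySem.Str.join "" (epi.map (fun x => x.2.1)),
       ((PySem.List.min? (epi.map (fun x => x.2.2.1)) (fun d => d)).getD 0,
        (PySem.List.max? (epi.map (fun x => x.2.2.1)) (fun d => d)).getD 0),
       PySem.Str.join "" (epi.map (fun x => PySem.Int.toStr x.2.2.2)))))

-- ===== PORT B =====
-- number of leading passing positions of the remaining suffix (B's inner `while k < len(rest) …` counter)
def pvLead (tier : Int) : List (Int × String × Int × Int) → Nat
  | [] => 0
  | p :: t => if p.2.2.2 ≤ tier then pvLead tier t + 1 else 0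

-- B's run summary tuple
def pvSummarize (run : List (Int × String × Int × Int)) : String × (Int × Int) × String :=
  (PySem.Str.join "" (run.map (fun x => x.2.1)),
   ((PySem.List.min? (run.map (fun x => x.2.2.1)) (fun d => d)).getD 0,
    (PySem.List.max? (run.map (fun x => x.2.2.1)) (fun d => d)).getD 0),
   PySem.Str.join "" (run.map (fun x => PySem.Int.toStr x.2.2.2)))

-- B's `while rest:` loop, transcribed as recursion on the remaining suffix `rest`
def pvLoop (tier epi_len : Int) : List (Int × String × Int × Int) → List (String × (Int × Int) × String)
  | [] => []
  | p :: t =>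
    if p.2.2.2 ≤ tier then
      let k := pvLead tier (p :: t)
      let run := (p :: t).take k
      (if epi_len ≤ (run.length : Int) then [pvSummarize run] else []) ++ pvLoop tier epi_len ((p :: t).drop k)
    else pvLoop tier epi_len t
termination_by l => l.length
decreasing_by
  · simp only [List.length_drop, pvLead]
    simp_all
  · simp

def get_tier_epitope_alt (epitope : List (Int × String × Int × Int)) (tier : Int) (epi_len : Int) : Option (List (String × (Int × Int) × String)) :=
  let res := pvLoop tier epi_len epitope
  if res = [] then none else some res

-- ===== PRECONDITION & SPEC =====
-- Pre_ excludes exactly the inputs on which A raises ValueError (min() of an empty run):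
-- with epi_len ≤ 0 A appends an empty current_epi whenever a failing position is adjacent to
-- another failing position or to a boundary of the list; with epi_len ≥ 1 A always returns.
def Pre_get_tier_epitope (epitope : List (Int × String × Int × Int)) (tier : Int) (epi_len : Int) : Prop :=
  1 ≤ epi_len ∨
    (epitope ≠ [] ∧ (∀ p ∈ epitope.head?, p.2.2.2 ≤ tier) ∧ (∀ p ∈ epitope.getLast?, p.2.2.2 ≤ tier) ∧
     List.IsChain (fun a b => a.2.2.2 ≤ tier ∨ b.2.2.2 ≤ tier) epitope)
instance (epitope : List (Int × String × Int × Int)) (tier : Int) (epi_len : Int) : Decidable (Pre_get_tier_epitope epitope tier epi_len) := by unfold Pre_get_tier_epitope; infer_instance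

def pvWitness_get_tier_epitope : (List (Int × String × Int × Int)) × Int × Int := ([(0, "A", 1, 0)], 0, 1)

def Spec_get_tier_epitope (epitope : List (Int × String × Int × Int)) (tier : Int) (epi_len : Int) (out : Option (List (String × (Int × Int) × String))) : Prop := out = get_tier_epitope_alt epitope tier epi_len
instance (epitope : List (Int × String × Int × Int)) (tier : Int) (epi_len : Int) (out : Option (List (String × (Int × Int) × String))) : Decidable (Spec_get_tier_epitope epitope tier epi_len out) := by unfold Spec_get_tier_epitope; infer_instance

-- ===== CLAIM (what is proved, stated in full; the proofs are below) =====
def Claim_equal_get_tier_epitope : Prop := ∀ (epitope : List (Int × String × Int × Int)) (tier : Int) (epi_len : Int), Dom_get_tier_epitope epitope tier epi_len → Pre_get_tier_epitope epitope tier epi_len → Spec_get_tier_epitope epitope tier epi_len (get_tier_epitope epitope tier epi_len)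

-- ===== LEMMAS AND PROOFS =====

-- the list of runs A's state machine flushes, as a recursion over the remaining input
-- (cur is the pending current_epi)
def pvMachine (tier epi_len : Int) (cur : List (Int × String × Int × Int)) : List (Int × String × Int × Int) → List (List (Int × String × Int × Int))
  | [] => if epi_len ≤ (cur.length : Int) then [cur] else []
  | p :: t =>
    if p.2.2.2 ≤ tier then pvMachine tier epi_len (cur ++ [p]) t
    else (if epi_len ≤ (cur.length : Int) then [cur] else []) ++ pvMachine tier epi_len [] t

-- A's fold followed by the final flush computes acc ++ pvMachine
theorem pvA1 (tier epi_len : Int) : ∀ (l : List (Int × String × Int × Int)) (acc : List (List (Int × String × Int × Int))) (cur : List (Int × String × Int × Int)),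
    (if epi_len ≤ (((l.foldl (pvStepA tier epi_len) (acc, cur)).2.length : Int))
      then (l.foldl (pvStepA tier epi_len) (acc, cur)).1 ++ [(l.foldl (pvStepA tier epi_len) (acc, cur)).2]
      else (l.foldl (pvStepA tier epi_len) (acc, cur)).1)
      = acc ++ pvMachine tier epi_len cur l := by
  intro l
  induction l with
  | nil =>
    intro acc cur
    simp only [List.foldl_nil, pvMachine]
    split <;> simp
  | cons p t ih =>
    intro acc cur
    simp only [List.foldl_cons, pvStepA, pvMachine]
    by_cases hp : p.2.2.2 ≤ tier
    · simp only [hp, if_true, ih]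
    · simp only [hp, if_false]
      by_cases hl : epi_len ≤ (cur.length : Int)
      · simp only [hl, if_true, ih, List.append_assoc, List.singleton_append]
      · simp only [hl, if_false, ih, List.nil_append]

-- pvMachine, decomposed at the first maximal passing run (cut at pvLead)
theorem pvM (tier epi_len : Int) : ∀ (l : List (Int × String × Int × Int)) (cur : List (Int × String × Int × Int)),
    pvMachine tier epi_len cur l =
      (if epi_len ≤ (((cur ++ l.take (pvLead tier l)).length : Int))
        then [cur ++ l.take (pvLead tier l)] else []) ++
      (match l.drop (pvLead tier l) with
       | [] => []
       | _ :: t => pvMachine tier epi_len [] t) := by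
  intro l
  induction l with
  | nil =>
    intro cur
    simp [pvMachine, pvLead]
  | cons p t ih =>
    intro cur
    by_cases hp : p.2.2.2 ≤ tier
    · simp only [pvMachine, hp, if_true, pvLead, List.take_succ_cons, List.drop_succ_cons, ih,
        List.append_assoc, List.singleton_append]
    · simp only [pvMachine, hp, if_false, pvLead, List.take_zero, List.drop_zero,
        List.append_nil]

-- the remaining suffix after the cut starts with a failing position
theorem pvDropFail (tier : Int) : ∀ (l : List (Int × String × Int × Int)) (q : Int × String × Int × Int) (t' : List (Int × String × Int × Int)),
    l.drop (pvLead tier l) = q :: t' → ¬ q.2.2.2 ≤ tier := by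
  intro l
  induction l with
  | nil => intro q t' h; simp at h
  | cons p t ih =>
    intro q t' h
    by_cases hp : p.2.2.2 ≤ tier
    · simp only [pvLead, hp, if_true, List.drop_succ_cons] at h
      exact ih q t' h
    · simp only [pvLead, hp, if_false, List.drop_zero, List.cons.injEq] at h
      rw [← h.1]; exact hp

-- B ≡ map pvSummarize ∘ pvMachine, when epi_len ≥ 1 (no empty run is ever flushed)
theorem pvB1a (tier epi_len : Int) (he : 1 ≤ epi_len) : ∀ (n : Nat) (l : List (Int × String × Int × Int)), l.length ≤ n →
    pvLoop tier epi_len l = (pvMachine tier epi_len [] l).map pvSummarize := by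
  intro n
  induction n with
  | zero =>
    intro l hl
    have : l = [] := List.length_eq_zero_iff.mp (Nat.le_zero.mp hl)
    subst this
    simp [pvLoop, pvMachine]
    omega
  | succ n ih =>
    intro l hl
    match l with
    | [] => simp [pvLoop, pvMachine]; omega
    | p :: t =>
      by_cases hp : p.2.2.2 ≤ tier
      · rw [pvLoop, pvM]
        simp only [hp, if_true]
        rw [List.map_append]
        congr 1
        · split <;> simp_all [pvSummarize]
        · rcases hdrop : (p :: t).drop (pvLead tier (p :: t)) with _ | ⟨q, t'⟩
          · simp [pvLoop]
          · have hq := pvDropFail tier (p :: t) q t' hdrop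
            have hlen : t'.length ≤ n := by
              have h1 : pvLead tier (p :: t) = pvLead tier t + 1 := by simp [pvLead, hp]
              have h2 := congrArg List.length hdrop
              simp [h1] at h2
              simp at hl
              omega
            rw [pvLoop]
            simp only [hq, if_false]
            exact ih t' hlen
      · rw [pvLoop]
        simp only [hp, if_false]
        rw [ih t (by simp at hl; omega)]
        simp [pvMachine, hp]
        omega

-- B ≡ map pvSummarize ∘ pvMachine on well-formed inputs (head and last pass, no two
-- adjacent failing positions), for any epi_len: again no empty run is ever flushed
theorem pvB1b (tier epi_len : Int) : ∀ (n : Nat) (l : List (Int × String × Int × Int)), l.length ≤ n →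
    l ≠ [] → (∀ p ∈ l.head?, p.2.2.2 ≤ tier) → (∀ p ∈ l.getLast?, p.2.2.2 ≤ tier) →
    List.IsChain (fun a b => a.2.2.2 ≤ tier ∨ b.2.2.2 ≤ tier) l →
    pvLoop tier epi_len l = (pvMachine tier epi_len [] l).map pvSummarize := by
  intro n
  induction n with
  | zero =>
    intro l hl hne _ _ _
    exact absurd (List.length_eq_zero_iff.mp (Nat.le_zero.mp hl)) hne
  | succ n ih =>
    intro l hl hne hhead hlast hchain
    rcases l with _ | ⟨p, t⟩
    · exact absurd rfl hne
    · have hp : p.2.2.2 ≤ tier := hhead p (by simp)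
      rw [pvLoop, pvM]
      simp only [hp, if_true]
      rw [List.map_append]
      congr 1
      · split <;> simp_all [pvSummarize]
      · rcases hdrop : (p :: t).drop (pvLead tier (p :: t)) with _ | ⟨q, t'⟩
        · simp [pvLoop]
        · have hq := pvDropFail tier (p :: t) q t' hdrop
          -- q :: t' is a nonempty suffix of l
          have hsuffix : (q :: t') <:+ (p :: t) := hdrop ▸ List.drop_suffix _ _
          have hlast' : (q :: t').getLast? = (p :: t).getLast? := by
            obtain ⟨a, ha⟩ := hsuffix
            rw [← ha]
            exact (List.getLast?_append_of_ne_nil a (by simp)).symm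
          have hchain' : List.IsChain (fun a b => a.2.2.2 ≤ tier ∨ b.2.2.2 ≤ tier) (q :: t') :=
            hchain.suffix hsuffix
          -- t' is nonempty: q fails, so q is not the last element
          rcases t' with _ | ⟨r, t''⟩
          · exact absurd (hlast q (by rw [← hlast']; simp)) hq
          · have hr : r.2.2.2 ≤ tier := Or.resolve_left hchain'.rel hq
            have hlen : (r :: t'').length ≤ n := by
              have h1 : pvLead tier (p :: t) = pvLead tier t + 1 := by simp [pvLead, hp]
              have h2 := congrArg List.length hdrop
              simp [h1] at h2
              simp at hl
              simp only [List.length_cons]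
              omega
            rw [pvLoop]
            simp only [hq, if_false]
            exact ih (r :: t'') hlen (by simp) (by simpa using hr)
              (by rw [show (r :: t'').getLast? = (q :: r :: t'').getLast? by simp, hlast']; exact hlast)
              hchain'.of_cons

-- ===== VERDICT (by name: the statement is the Claim_ definition above) =====
theorem get_tier_epitope_spec : Claim_equal_get_tier_epitope := by
  intro epitope tier epi_len _ hPre
  unfold Spec_get_tier_epitope get_tier_epitope get_tier_epitope_alt
  have hfold := pvA1 tier epi_len epitope [] []
  rw [List.nil_append] at hfold
  have hloop : pvLoop tier epi_len epitope = (pvMachine tier epi_len [] epitope).map pvSummarize := by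
    rcases hPre with he | ⟨hne, hhead, hlast, hchain⟩
    · exact pvB1a tier epi_len he epitope.length epitope le_rfl
    · exact pvB1b tier epi_len epitope.length epitope le_rfl hne hhead hlast hchain
  simp only []
  rw [hfold, hloop]
  have hsum : (fun epi : List (Int × String × Int × Int) =>
      (PySem.Str.join "" (epi.map (fun x => x.2.1)),
       ((PySem.List.min? (epi.map (fun x => x.2.2.1)) (fun d => d)).getD 0,
        (PySem.List.max? (epi.map (fun x => x.2.2.1)) (fun d => d)).getD 0),
       PySem.Str.join "" (epi.map (fun x => PySem.Int.toStr x.2.2.2)))) = pvSummarize := rfl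
  rw [hsum]
  rcases hM : pvMachine tier epi_len [] epitope with _ | _ <;> simp
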